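-- pv_equiv track=rewrite | github.com/longle2718/learnCS | bits/bits.py | ffs_table
-- ===== SOURCE A (Python) =====
-- def ffs(x):
--     # find first set/one
--     if x == 0:
--         return 0
--     mask = 1
--     cnt = 0
--     while x & mask == 0:
--         mask <<= 1
--         cnt += 1
--     return cnt
--
-- def ffs_table(x):
--     # time-space tradeoff with assistant tables
--     if x == 0:
--         return 0
--
--     n = 8
--     table = [ffs(i) for i in range(2**8)]
--     cnt = 0
--     while True:
--         if x & (2**n-1) != 0:
--             return cnt + table[x & (2**n-1)]
--         x >>= n
--         cnt += n
-- ===== SOURCE B (Python) =====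
-- def ffs_table(x):
--     # closed form: isolate the lowest set bit with x & -x, read its position off bit_length
--     if x == 0:
--         return 0
--     return (x & -x).bit_length() - 1
-- ===== Notes on version B (the rewrite author's own statement) =====
-- stated objective: idiomatic
-- what changed: Replaces the per-call precomputed byte table (built by a mask-shifting helper loop) and the byte-at-a-time shift loop with the closed form (x & -x).bit_length() - 1.
import Mathlib
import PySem

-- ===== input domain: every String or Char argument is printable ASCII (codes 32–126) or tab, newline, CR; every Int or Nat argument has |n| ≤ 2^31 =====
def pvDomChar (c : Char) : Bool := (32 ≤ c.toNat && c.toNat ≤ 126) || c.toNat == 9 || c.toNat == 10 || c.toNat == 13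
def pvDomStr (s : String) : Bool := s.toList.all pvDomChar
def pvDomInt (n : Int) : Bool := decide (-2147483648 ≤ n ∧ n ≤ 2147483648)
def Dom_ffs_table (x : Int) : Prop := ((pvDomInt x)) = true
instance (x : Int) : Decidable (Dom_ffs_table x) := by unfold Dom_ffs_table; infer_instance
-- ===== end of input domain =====

-- B replaces A's per-call precomputed byte table and byte-at-a-time shift loop with the
-- closed form (x & -x).bit_length() - 1 (proved equal for every Int, A is total).

-- ===== PORT A =====
-- helper ffs: `while x & mask == 0: mask <<= 1; cnt += 1`.  The loop is ported with a
-- fuel guard (x.natAbs + 1 iterations always suffice, see ffsLoop_spec); fuel running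
-- out is unreachable and merely makes the recursion total.
def ffsLoop (x mask cnt : Int) (fuel : Nat) : Int :=
  match fuel with
  | 0 => cnt
  | fuel + 1 =>
      if PySem.Int.band x mask = 0 then ffsLoop x (mask <<< (1 : Nat)) (cnt + 1) fuel
      else cnt

def ffsPy (x : Int) : Int :=
  if x = 0 then 0
  else ffsLoop x 1 0 (x.natAbs + 1)

-- `while True: if x & (2**n-1) != 0: return cnt + table[...]; x >>= n; cnt += n`
-- again with an unreachable fuel guard (0 on fuel exhaustion is never returned);
-- table[x & 255] cannot raise (index always in [0,255]), so pyGetD with default 0 is exact.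
def tblLoop (table : List Int) (x cnt : Int) (fuel : Nat) : Int :=
  match fuel with
  | 0 => 0
  | fuel + 1 =>
      if PySem.Int.band x ((2:Int)^8 - 1) ≠ 0 then
        cnt + PySem.List.pyGetD table (PySem.Int.band x ((2:Int)^8 - 1)) 0
      else tblLoop table (x >>> (8 : Nat)) (cnt + 8) fuel

def ffs_table (x : Int) : Int :=
  if x = 0 then 0
  else
    -- n = 8; table = [ffs(i) for i in range(2**8)]
    tblLoop ((PySem.List.pyRange 0 ((2:Int)^8) 1).map ffsPy) x 0 (x.natAbs + 1)

-- ===== PORT B =====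
def ffs_table_alt (x : Int) : Int :=
  if x = 0 then 0
  else (PySem.Int.bitLength (PySem.Int.band x (-x)) : Int) - 1

-- ===== PRECONDITION & SPEC =====
def Spec_ffs_table (x : Int) (out : Int) : Prop := out = ffs_table_alt x
instance (x : Int) (out : Int) : Decidable (Spec_ffs_table x out) := by unfold Spec_ffs_table; infer_instance

-- ===== CLAIM (what is proved, stated in full; the proofs are below) =====
def Claim_equal_ffs_table : Prop := ∀ (x : Int), Dom_ffs_table x → Spec_ffs_table x (ffs_table x)

-- ===== LEMMAS AND PROOFS =====

-- tz n = number of trailing zero bits of n (tz 0 = 0), the common value of both programs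
def tz (n : Nat) : Nat :=
  if _h : n ≠ 0 ∧ n % 2 = 0 then tz (n / 2) + 1 else 0
termination_by n
decreasing_by omega

theorem tz_of_odd (n : Nat) (h : n % 2 = 1) : tz n = 0 := by
  rw [tz]; simp [h]

theorem tz_of_even (n : Nat) (h0 : n ≠ 0) (h : n % 2 = 0) : tz n = tz (n / 2) + 1 := by
  rw [tz]; simp [h0, h]

theorem tz_spec (n : Nat) (h : n ≠ 0) :
    2 ^ tz n ∣ n ∧ n / 2 ^ tz n % 2 = 1 := by
  induction n using Nat.strong_induction_on with
  | _ n ih =>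
    rcases Nat.mod_two_eq_zero_or_one n with he | ho
    · rw [tz_of_even n h he]
      obtain ⟨hd, hm⟩ := ih (n / 2) (by omega) (by omega)
      refine ⟨?_, ?_⟩
      · obtain ⟨q, hq⟩ := hd
        exact ⟨q, by rw [pow_succ, show 2 ^ tz (n / 2) * 2 * q = 2 * (2 ^ tz (n / 2) * q) by ring]; omega⟩
      · have e : n / 2 ^ (tz (n / 2) + 1) = n / 2 / 2 ^ tz (n / 2) := by
          rw [Nat.div_div_eq_div_mul, pow_succ, Nat.mul_comm (2 ^ tz (n / 2)) 2]
        rw [e]; exact hm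
    · rw [tz_of_odd n ho]; simpa using ho

theorem tz_not_dvd (n : Nat) (h : n ≠ 0) : ¬ 2 ^ (tz n + 1) ∣ n := by
  obtain ⟨hd, hm⟩ := tz_spec n h
  set t := tz n with ht
  rintro ⟨q, hq⟩
  have : n / 2 ^ t = 2 * q := by
    rw [hq, pow_succ, show 2 ^ t * 2 * q = 2 ^ t * (2 * q) by ring]
    exact Nat.mul_div_cancel_left _ (by positivity)
  omega

theorem le_tz (n c : Nat) (h : n ≠ 0) (hd : 2 ^ c ∣ n) : c ≤ tz n := by
  by_contra hlt
  exact tz_not_dvd n h (dvd_trans (pow_dvd_pow 2 (by omega)) hd)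

theorem tz_unique (n t : Nat) (h : n ≠ 0) (hd : 2 ^ t ∣ n) (hnd : ¬ 2 ^ (t + 1) ∣ n) :
    tz n = t := by
  have h1 := le_tz n t h hd
  have h2 : ¬ t + 1 ≤ tz n := fun hle =>
    hnd (dvd_trans (pow_dvd_pow 2 hle) (tz_spec n h).1)
  omega

theorem tz_two_pow_mul (k m : Nat) (hm : m ≠ 0) : tz (2 ^ k * m) = k + tz m := by
  induction k with
  | zero => simp
  | succ k ih =>
      have hne : 2 ^ (k + 1) * m ≠ 0 := by positivity
      rw [tz_of_even _ hne (by rw [pow_succ, Nat.mul_comm _ 2, Nat.mul_assoc]; omega)]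
      have : 2 ^ (k + 1) * m / 2 = 2 ^ k * m := by
        rw [pow_succ, Nat.mul_comm _ 2, Nat.mul_assoc, Nat.mul_div_cancel_left _ (by omega)]
      rw [this, ih]; omega

-- the two Nat bit-facts behind `x & -x`
theorem and_pred_of_odd (n : Nat) (h : n % 2 = 1) : n &&& (n - 1) = n - 1 := by
  apply Nat.eq_of_testBit_eq
  intro i
  cases i with
  | zero => simp [Nat.testBit_zero]; omega
  | succ i =>
      rw [Nat.testBit_and, Nat.testBit_add_one, Nat.testBit_add_one]
      have : n / 2 = (n - 1) / 2 := by omega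
      rw [this]; simp

theorem and_pred_of_even (m : Nat) (hm : 0 < m) :
    (2 * m) &&& (2 * m - 1) = 2 * (m &&& (m - 1)) := by
  apply Nat.eq_of_testBit_eq
  intro i
  cases i with
  | zero => simp [Nat.testBit_zero]
  | succ i =>
      rw [Nat.testBit_and, Nat.testBit_add_one, Nat.testBit_add_one, Nat.testBit_add_one]
      have h1 : 2 * m / 2 = m := by omega
      have h2 : (2 * m - 1) / 2 = m - 1 := by omega
      have h3 : 2 * (m &&& (m - 1)) / 2 = m &&& (m - 1) := by omega
      rw [h1, h2, h3, Nat.testBit_and]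

theorem sub_and_pred (n : Nat) (h : n ≠ 0) : n - (n &&& (n - 1)) = 2 ^ tz n := by
  induction n using Nat.strong_induction_on with
  | _ n ih =>
    rcases Nat.mod_two_eq_zero_or_one n with he | ho
    · obtain ⟨m, hm⟩ : ∃ m, n = 2 * m := ⟨n / 2, by omega⟩
      have hm0 : 0 < m := by omega
      subst hm
      rw [and_pred_of_even m hm0, tz_of_even _ h he,
          show 2 * m / 2 = m by omega, pow_succ]
      have hle : m &&& (m - 1) ≤ m := Nat.and_le_left
      have := ih m (by omega) (by omega)
      omega
    · rw [and_pred_of_odd n ho, tz_of_odd n ho]; omega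

-- `x & -x` is the lowest set bit, as a power of two
theorem band_neg_self (x : Int) (h : x ≠ 0) :
    PySem.Int.band x (-x) = ((2 ^ tz x.natAbs : Nat) : Int) := by
  have hN : x.natAbs ≠ 0 := by omega
  rcases lt_or_gt_of_ne h with hneg | hpos
  · have h1 : ¬ (0 : Int) ≤ x := by omega
    have h2 : (0 : Int) ≤ -x := by omega
    simp only [PySem.Int.band, h1, h2, if_true, if_false]
    have e1 : (-x).toNat = x.natAbs := by omega
    have e2 : (-x - 1).toNat = x.natAbs - 1 := by omega
    rw [e1, e2, sub_and_pred x.natAbs hN]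
  · have h1 : (0 : Int) ≤ x := by omega
    have h2 : ¬ (0 : Int) ≤ -x := by omega
    simp only [PySem.Int.band, h1, h2, if_true, if_false]
    have e1 : x.toNat = x.natAbs := by omega
    have e2 : (- -x - 1).toNat = x.natAbs - 1 := by omega
    rw [e1, e2, sub_and_pred x.natAbs hN]

theorem bitLength_two_pow (k : Nat) : PySem.Int.bitLength ((2 ^ k : Nat) : Int) = k + 1 := by
  have h1 := PySem.Int.lt_two_pow_bitLength ((2 ^ k : Nat) : Int)
  have h2 := PySem.Int.two_pow_bitLength_le ((2 ^ k : Nat) : Int) (by positivity)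
  simp only [Int.natAbs_natCast] at h1 h2
  have hk : k < PySem.Int.bitLength ((2 ^ k : Nat) : Int) :=
    (Nat.pow_lt_pow_iff_right (by omega)).1 h1
  have hb1 : PySem.Int.bitLength ((2 ^ k : Nat) : Int) - 1 ≤ k :=
    (Nat.pow_le_pow_iff_right (by omega)).1 h2
  omega

-- B computes tz
theorem alt_eq_tz (x : Int) (h : x ≠ 0) : ffs_table_alt x = (tz x.natAbs : Int) := by
  simp only [ffs_table_alt, h, if_false]
  rw [band_neg_self x h, bitLength_two_pow]
  push_cast
  ring

-- x & 2^c as a testBit, for positive x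
theorem band_two_pow (x : Int) (c : Nat) (hx : 0 ≤ x) :
    PySem.Int.band x ((2:Int) ^ c) = 0 ↔ x.natAbs / 2 ^ c % 2 = 0 := by
  have h2 : ((2:Int) ^ c) = ((2 ^ c : Nat) : Int) := by push_cast; ring
  rw [h2, PySem.Int.band_of_nonneg hx (by positivity)]
  have e1 : x.toNat = x.natAbs := by omega
  have e2 : ((2 ^ c : Nat) : Int).toNat = 2 ^ c := Int.toNat_natCast (2 ^ c)
  rw [e1, e2, Nat.and_two_pow, Nat.testBit_eq_decide_div_mod_eq]
  have hpos : (0 : Nat) < 2 ^ c := by positivity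
  rcases Nat.mod_two_eq_zero_or_one (x.natAbs / 2 ^ c) with h | h
  · simp [h]
  · simp [h]

-- the ffs helper loop returns tz
theorem ffsLoop_spec (fuel : Nat) : ∀ (x : Int) (c : Nat), 0 < x →
    2 ^ c ∣ x.natAbs → tz x.natAbs < c + fuel →
    ffsLoop x ((2:Int) ^ c) (c : Int) fuel = (tz x.natAbs : Int) := by
  induction fuel with
  | zero =>
      intro x c hx hd hlt
      have := le_tz x.natAbs c (by omega) hd
      omega
  | succ fuel ih =>
      intro x c hx hd hlt
      have hN : x.natAbs ≠ 0 := by omega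
      rw [ffsLoop]
      by_cases hb : PySem.Int.band x ((2:Int) ^ c) = 0
      · have hev : x.natAbs / 2 ^ c % 2 = 0 := (band_two_pow x c (by omega)).1 hb
        have hd1 : 2 ^ (c + 1) ∣ x.natAbs := by
          obtain ⟨q, hq⟩ := hd
          have hqq : x.natAbs / 2 ^ c = q := by
            rw [hq]; exact Nat.mul_div_cancel_left q (by positivity)
          obtain ⟨m, hm⟩ : ∃ m, q = 2 * m := ⟨q / 2, by omega⟩
          exact ⟨m, by rw [hq, hm, pow_succ]; ring⟩
        have hstep : ((2:Int) ^ c) <<< (1 : Nat) = (2:Int) ^ (c + 1) := by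
          rw [Int.shiftLeft_eq]; ring
        have hc1 : (c : Int) + 1 = ((c + 1 : Nat) : Int) := by push_cast; ring
        rw [if_pos hb, hstep, hc1]
        apply ih x (c + 1) hx hd1
        have := le_tz x.natAbs (c + 1) hN hd1
        omega
      · rw [if_neg hb]
        have hodd : x.natAbs / 2 ^ c % 2 = 1 := by
          have := (band_two_pow x c (by omega)).2
          rcases Nat.mod_two_eq_zero_or_one (x.natAbs / 2 ^ c) with h | h
          · exact absurd (this h) hb
          · exact h
        have : tz x.natAbs = c := by
          apply tz_unique x.natAbs c hN hd
          rintro ⟨q, hq⟩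
          have hq' : x.natAbs = 2 ^ c * (2 * q) := by rw [hq, pow_succ]; ring
          have : x.natAbs / 2 ^ c = 2 * q := by
            rw [hq']; exact Nat.mul_div_cancel_left _ (by positivity)
          omega
        rw [this]

theorem ffsPy_spec (r : Int) (hr : 0 < r) : ffsPy r = (tz r.natAbs : Int) := by
  have h0 : r ≠ 0 := by omega
  simp only [ffsPy, h0, if_false]
  have h1 : (1 : Int) = (2:Int) ^ 0 := by norm_num
  have h2 : (0 : Int) = ((0 : Nat) : Int) := by norm_num
  rw [h1, h2]
  apply ffsLoop_spec (r.natAbs + 1) r 0 hr (by simp)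
  have hd := (tz_spec r.natAbs (by omega)).1
  have hle : 2 ^ tz r.natAbs ≤ r.natAbs := Nat.le_of_dvd (by omega) hd
  have := Nat.lt_two_pow_self (n := r.natAbs)
  have := Nat.lt_two_pow_self (n := tz r.natAbs)
  omega

-- x & 255 is x mod 256 (Python two's complement)
theorem band_mask (x : Int) : PySem.Int.band x ((2:Int) ^ 8 - 1) = x % 256 := by
  have hm : ((2:Int) ^ 8 - 1) = (255 : Int) := by norm_num
  rw [hm]
  by_cases hx : (0 : Int) ≤ x
  · simp only [PySem.Int.band, hx, if_true, show (0:Int) ≤ 255 by norm_num]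
    have h255 : (255 : Int).toNat = 2 ^ 8 - 1 := by decide
    rw [h255, Nat.and_two_pow_sub_one_eq_mod]
    omega
  · simp only [PySem.Int.band, hx, if_false, if_true, show (0:Int) ≤ 255 by norm_num]
    have h255 : (255 : Int).toNat = 2 ^ 8 - 1 := by decide
    rw [h255, Nat.and_comm, Nat.and_two_pow_sub_one_eq_mod]
    omega

-- table lookup: table[r] = ffs(r) for 0 ≤ r < 256
theorem table_lookup (r : Int) (h0 : 0 ≤ r) (h256 : r < 256) :
    PySem.List.pyGetD ((PySem.List.pyRange 0 ((2:Int)^8) 1).map ffsPy) r 0 = ffsPy r := by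
  exact PySem.List.pyGetD_map_pyRange_of_nonneg ffsPy ((2:Int)^8) r 0 h0 (by omega)

-- residues mod 256 have the same trailing zeros (when the residue is nonzero)
theorem tz_emod (x : Int) (_hx : x ≠ 0) (hr : x % 256 ≠ 0) :
    tz (x % 256).natAbs = tz x.natAbs := by
  have hr0 : 0 ≤ x % 256 := Int.emod_nonneg x (by norm_num)
  have hr256 : x % 256 < 256 := Int.emod_lt_of_pos x (by norm_num)
  have hrn : (x % 256).natAbs ≠ 0 := by omega
  set t := tz (x % 256).natAbs with ht
  -- t ≤ 7 because 2^t divides a nonzero number < 256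
  have htd := (tz_spec (x % 256).natAbs hrn).1
  have hle : 2 ^ t ≤ (x % 256).natAbs := Nat.le_of_dvd (by omega) htd
  have ht7 : t ≤ 7 := by
    by_contra hgt
    have : 2 ^ 8 ≤ 2 ^ t := Nat.pow_le_pow_right (by omega) (by omega)
    omega
  -- transfer divisibility between x and x % 256 (Int side)
  have key : ∀ j : Nat, j ≤ 8 → ((2:Int) ^ j ∣ x % 256 ↔ (2:Int) ^ j ∣ x) := by
    intro j hj
    have h256d : (2:Int) ^ j ∣ 256 := by
      have : (256 : Int) = 2 ^ 8 := by norm_num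
      rw [this]; exact pow_dvd_pow 2 hj
    have hsplit : x = x % 256 + 256 * (x / 256) := by omega
    constructor
    · intro hd
      rw [hsplit]
      exact dvd_add hd (h256d.mul_right _)
    · intro hd
      have heq : x % 256 = x - 256 * (x / 256) := by omega
      rw [heq]
      exact dvd_sub hd (h256d.mul_right _)
  have hint : ∀ (y : Int) (j : Nat), ((2:Int) ^ j ∣ y ↔ 2 ^ j ∣ y.natAbs) := by
    intro y j
    rw [← Int.natAbs_dvd_natAbs]
    simp
  apply (tz_unique x.natAbs t (by omega) ?_ ?_).symm
  · exact (hint x t).1 ((key t (by omega)).1 ((hint (x % 256) t).2 htd))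
  · intro hd
    exact tz_not_dvd (x % 256).natAbs hrn
      ((hint (x % 256) (t+1)).1 ((key (t+1) (by omega)).2 ((hint x (t+1)).2 hd)))

-- the main byte loop returns cnt + tz
theorem tblLoop_spec (fuel : Nat) : ∀ (x cnt : Int), x ≠ 0 → x.natAbs < fuel →
    tblLoop ((PySem.List.pyRange 0 ((2:Int)^8) 1).map ffsPy) x cnt fuel
      = cnt + (tz x.natAbs : Int) := by
  induction fuel with
  | zero => intro x cnt hx hf; omega
  | succ fuel ih =>
      intro x cnt hx hf
      rw [tblLoop]
      by_cases hr : PySem.Int.band x ((2:Int)^8 - 1) ≠ 0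
      · rw [if_pos hr]
        have hrm : x % 256 ≠ 0 := by rw [← band_mask]; exact hr
        rw [band_mask, table_lookup (x % 256) (Int.emod_nonneg x (by norm_num))
              (Int.emod_lt_of_pos x (by norm_num)),
            ffsPy_spec (x % 256) (by have := Int.emod_nonneg x (show (256:Int) ≠ 0 by norm_num); omega),
            tz_emod x hx hrm]
      · rw [if_neg hr]
        rw [not_not] at hr
        have hrm : x % 256 = 0 := by rw [← band_mask]; exact hr
        have hshift : x >>> (8 : Nat) = x / 256 := by
          rw [Int.shiftRight_eq_div_pow]; norm_num
        have hy0 : x / 256 ≠ 0 := by omega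
        have habs : x.natAbs = 256 * (x / 256).natAbs := by omega
        have hyf : (x / 256).natAbs < fuel := by omega
        rw [hshift, ih (x / 256) (cnt + 8) hy0 hyf]
        have htz : tz x.natAbs = 8 + tz (x / 256).natAbs := by
          rw [habs, show (256 : Nat) = 2 ^ 8 by norm_num,
              tz_two_pow_mul 8 (x / 256).natAbs (by omega)]
        rw [htz]
        push_cast
        ring

-- ===== VERDICT (by name: the statement is the Claim_ definition above) =====
theorem ffs_table_spec : Claim_equal_ffs_table := by
  intro x _
  unfold Spec_ffs_table
  by_cases hx : x = 0
  · simp [ffs_table, ffs_table_alt, hx]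
  · rw [alt_eq_tz x hx]
    simp only [ffs_table, hx, if_false]
    rw [tblLoop_spec (x.natAbs + 1) x 0 hx (by omega)]
    ring
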